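-- pv_equiv track=rewrite | github.com/Sheffield-CRACK/emails | arxiv_search.py | keyword
-- ===== SOURCE A (Python) =====
-- def keyword(article, list1, list2):
--    # search through the lists of keywords. If want to keep abstract return True, else False
--     article = article.lower()
--     if 'astro2020' in article:
--         return False
--     n2 = 0
--     for item in list1:
--         item = item[:-1]
--         if article.find(item) >= 0:
--             return True                 # for list 1 keep abstract if only 1 word present
--     for item in list2:
--         item = item[:-1]
--         if article.find(item) >= 0:
--             n2+=1
--         if n2==2:
--             return True                 # for list 2 require 2 words to keep abstract
--     return False
-- ===== SOURCE B (Python) =====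
-- def keyword(article, list1, list2):
--     # Text-major single pass: walk the article once, position by position, and at each
--     # position test which patterns start there, accumulating per-pattern match flags.
--     a = article.lower()
--     pats1 = [item[:-1] for item in list1]
--     pats2 = [item[:-1] for item in list2]
--     bad = False
--     hit1 = False
--     matched2 = [False] * len(pats2)
--     for i in range(len(a) + 1):
--         bad = bad or a.startswith('astro2020', i)
--         hit1 = hit1 or any(a.startswith(p, i) for p in pats1)
--         matched2 = [m or a.startswith(p, i) for m, p in zip(matched2, pats2)]
--     return (not bad) and (hit1 or sum(matched2) >= 2)
-- ===== Notes on version B (the rewrite author's own statement) =====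
-- stated objective: alternative
-- what changed: Replaces A's pattern-major repeated article scans (str.find per keyword, early returns) with one text-major left-to-right pass over the article that at each position tests which patterns start there, accumulating a bad flag, a list1 hit flag and a per-list2-pattern matched vector, deciding at the end.
import Mathlib
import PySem

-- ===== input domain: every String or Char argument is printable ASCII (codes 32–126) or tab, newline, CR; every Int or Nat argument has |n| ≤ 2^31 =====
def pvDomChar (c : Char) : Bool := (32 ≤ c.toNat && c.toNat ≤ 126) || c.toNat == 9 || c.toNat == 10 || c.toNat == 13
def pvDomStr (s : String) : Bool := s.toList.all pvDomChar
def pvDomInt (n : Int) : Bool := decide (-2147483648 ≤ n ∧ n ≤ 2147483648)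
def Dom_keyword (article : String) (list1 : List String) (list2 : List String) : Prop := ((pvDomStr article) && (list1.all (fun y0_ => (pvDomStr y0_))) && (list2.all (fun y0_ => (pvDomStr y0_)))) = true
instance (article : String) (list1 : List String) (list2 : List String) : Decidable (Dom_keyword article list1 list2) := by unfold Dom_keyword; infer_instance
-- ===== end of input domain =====

-- B replaces A's pattern-major repeated scans (find per keyword, early returns) with one
-- text-major pass over the article accumulating per-pattern match flags; same cost (alternative).
-- ===== PORT A =====
def kwLoop2 (article : String) : List String → Nat → Bool
  | [], _ => false
  | item :: rest, n2 =>
    let item' := PySem.Str.slice item none (some (-1))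
    let n2' := if PySem.Str.find article item' ≥ 0 then n2 + 1 else n2
    if n2' = 2 then true else kwLoop2 article rest n2'

def kwLoop1 (article : String) : List String → List String → Bool
  | [], list2 => kwLoop2 article list2 0
  | item :: rest, list2 =>
    let item' := PySem.Str.slice item none (some (-1))
    if PySem.Str.find article item' ≥ 0 then true else kwLoop1 article rest list2

def keyword (article : String) (list1 : List String) (list2 : List String) : Bool :=
  let article := PySem.Str.lower article
  if PySem.Str.isIn "astro2020" article then false
  else kwLoop1 article list1 list2

-- ===== PORT B =====
-- Python's a.startswith(p, i) with 0 ≤ i ≤ len(a): exact as prefix-of-drop on the char list.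
def kwStartsAt (a : List Char) (p : List Char) (i : Nat) : Bool := p.isPrefixOf (a.drop i)

-- Source B's '[item[:-1] for item in lst]'
def kwPats (lst : List String) : List (List Char) :=
  lst.map (fun item => (PySem.Str.slice item none (some (-1))).toList)

-- one step of Source B's loop body at text position i, on the state (bad, hit1, matched2)
def kwStep (a : List Char) (pats1 pats2 : List (List Char))
    (st : Bool × Bool × List Bool) (i : Nat) : Bool × Bool × List Bool :=
  (st.1 || kwStartsAt a "astro2020".toList i,
   st.2.1 || pats1.any (fun p => kwStartsAt a p i),
   List.zipWith (fun m p => m || kwStartsAt a p i) st.2.2 pats2)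

-- Source B's final 'return (not bad) and (hit1 or sum(matched2) >= 2)'
def kwFinish (st : Bool × Bool × List Bool) : Bool :=
  (!st.1) && (st.2.1 || decide (2 ≤ st.2.2.countP id))

def keyword_alt (article : String) (list1 : List String) (list2 : List String) : Bool :=
  kwFinish ((List.range ((PySem.Str.lower article).toList.length + 1)).foldl
    (kwStep (PySem.Str.lower article).toList (kwPats list1) (kwPats list2))
    (false, false, (kwPats list2).map (fun _ => false)))

-- ===== PRECONDITION & SPEC =====
def Spec_keyword (article : String) (list1 : List String) (list2 : List String) (out : Bool) : Prop := out = keyword_alt article list1 list2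
instance (article : String) (list1 : List String) (list2 : List String) (out : Bool) : Decidable (Spec_keyword article list1 list2 out) := by unfold Spec_keyword; infer_instance

-- ===== CLAIM (what is proved, stated in full; the proofs are below) =====
def Claim_equal_keyword : Prop := ∀ (article : String) (list1 : List String) (list2 : List String), Dom_keyword article list1 list2 → Spec_keyword article list1 list2 (keyword article list1 list2)

-- ===== LEMMAS AND PROOFS =====

-- 'item[:-1] in a', kept opaque so simp does not unfold it midway
def kwHitS (a : String) (it : String) : Bool :=
  PySem.Str.isIn (PySem.Str.slice it none (some (-1))) a

-- A's 'find(item[:-1]) >= 0' is 'item[:-1] in article'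
lemma find_ge_iff_kwHitS (a x : String) :
    (PySem.Str.find a (PySem.Str.slice x none (some (-1))) ≥ 0) = (kwHitS a x = true) := by
  simp [kwHitS, PySem.Str.find_eq, PySem.Str.isIn_eq, PySem.Chars.isIn_iff_infix, ge_iff_le,
    PySem.Chars.find_nonneg_iff]

lemma kwHitS_eq (a it : String) :
    PySem.Chars.isIn (PySem.Str.slice it none (some (-1))).toList a.toList = kwHitS a it := by
  simp [kwHitS]

-- the single-position tests over all positions recover Python's 'in'
lemma any_startsAt_eq_isIn (a p : List Char) :
    (List.range (a.length + 1)).any (kwStartsAt a p) = PySem.Chars.isIn p a := by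
  rw [Bool.eq_iff_iff]
  simp only [List.any_eq_true, List.mem_range, kwStartsAt, List.isPrefixOf_iff_prefix]
  rw [← PySem.Chars.exists_prefix_drop_iff_isIn]
  constructor
  · rintro ⟨i, _, hp⟩; exact ⟨i, hp⟩
  · rintro ⟨j, hj⟩
    by_cases hle : j ≤ a.length
    · exact ⟨j, by omega, hj⟩
    · have hd : a.drop j = [] := List.drop_eq_nil_of_le (by omega)
      exact ⟨0, by omega, by simp [List.prefix_nil.mp (hd ▸ hj)]⟩

lemma zipWith_zipWith {α β γ δ : Type} (f : γ → β → δ) (g : α → β → γ) (l : List α) (l' : List β) :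
    List.zipWith f (List.zipWith g l l') l' = List.zipWith (fun x y => f (g x y) y) l l' := by
  induction l generalizing l' with
  | nil => simp
  | cons x xs ih => cases l' <;> simp [ih]

lemma zipWith_fst {α : Type} (m : List Bool) (l : List α) (hm : m.length ≤ l.length) :
    List.zipWith (fun x _ => x) m l = m := by
  induction m generalizing l with
  | nil => simp
  | cons x xs ih =>
    cases l with
    | nil => simp at hm
    | cons y ys =>
      simp only [List.length_cons] at hm
      simp [ih ys (by omega)]

-- the whole fold, characterised componentwise
lemma fold_kwStep (a : List Char) (pats1 pats2 : List (List Char)) (I : List Nat)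
    (b h : Bool) (m : List Bool) (hm : m.length ≤ pats2.length) :
    I.foldl (kwStep a pats1 pats2) (b, h, m) =
      (b || I.any (kwStartsAt a "astro2020".toList),
       h || I.any (fun i => pats1.any (fun p => kwStartsAt a p i)),
       List.zipWith (fun x p => x || I.any (fun i => kwStartsAt a p i)) m pats2) := by
  induction I generalizing b h m with
  | nil => simp [zipWith_fst _ _ hm]
  | cons i is ih =>
    rw [List.foldl_cons]
    rw [show kwStep a pats1 pats2 (b, h, m) i =
        (b || kwStartsAt a "astro2020".toList i,
         h || pats1.any (fun p => kwStartsAt a p i),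
         List.zipWith (fun x p => x || kwStartsAt a p i) m pats2) from rfl]
    rw [ih _ _ _ (by simp [List.length_zipWith])]
    simp only [List.any_cons, zipWith_zipWith, Bool.or_assoc]

lemma zipWith_map_false {α : Type} (f : Bool → α → Bool) (l : List α) :
    List.zipWith f (l.map (fun _ => false)) l = l.map (fun p => f false p) := by
  induction l with
  | nil => rfl
  | cons x xs ih => simp only [List.map_cons, List.zipWith_cons_cons, ih]

lemma any_any_comm {α β : Type} (I : List α) (ps : List β) (f : β → α → Bool) :
    (I.any (fun i => ps.any (fun p => f p i))) = (ps.any (fun p => I.any (f p))) := by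
  rw [Bool.eq_iff_iff]
  simp only [List.any_eq_true]
  tauto

-- B's fold evaluated: the decision formula in terms of 'in'
lemma keyword_alt_eval (article : String) (l1 l2 : List String) :
    keyword_alt article l1 l2 =
      ((!PySem.Str.isIn "astro2020" (PySem.Str.lower article)) &&
        ((l1.any (kwHitS (PySem.Str.lower article))) ||
         decide (2 ≤ l2.countP (kwHitS (PySem.Str.lower article))))) := by
  unfold keyword_alt kwFinish
  rw [fold_kwStep _ _ _ _ _ _ _ (by simp)]
  simp only [Bool.false_or, zipWith_map_false, kwPats, List.any_map, List.countP_map,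
    Function.comp_def, id_eq]
  simp only [any_any_comm, any_startsAt_eq_isIn, kwHitS_eq]
  rw [show PySem.Chars.isIn "astro2020".toList (PySem.Str.lower article).toList
      = PySem.Str.isIn "astro2020" (PySem.Str.lower article) from by simp]

-- A's loops, characterised
lemma kwLoop1_eq (a : String) (l1 l2 : List String) :
    kwLoop1 a l1 l2 = (if l1.any (kwHitS a) then true else kwLoop2 a l2 0) := by
  induction l1 with
  | nil => simp [kwLoop1]
  | cons x xs ih =>
    simp only [kwLoop1]
    simp only [find_ge_iff_kwHitS]
    by_cases h : kwHitS a x = true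
    · simp [h]
    · simp [h, ih]

lemma kwLoop2_eq (a : String) (l2 : List String) (n2 : Nat) (hn : n2 < 2) :
    kwLoop2 a l2 n2 = decide (2 ≤ n2 + l2.countP (kwHitS a)) := by
  induction l2 generalizing n2 with
  | nil => simp [kwLoop2]; omega
  | cons x xs ih =>
    simp only [kwLoop2, List.countP_cons]
    simp only [find_ge_iff_kwHitS]
    by_cases h : kwHitS a x = true
    · simp only [h, if_pos]
      by_cases h2 : n2 + 1 = 2
      · simp [h2]; omega
      · have : n2 + 1 < 2 := by omega
        simp [h2, ih _ this]; constructor <;> (intro; omega)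
    · simp only [h]
      have : ¬ n2 = 2 := by omega
      simp [this, ih _ hn]

-- ===== VERDICT =====
theorem keyword_spec : Claim_equal_keyword := by
  intro article list1 list2 _
  unfold Spec_keyword keyword
  rw [keyword_alt_eval]
  simp only []
  rcases Bool.eq_false_or_eq_true (PySem.Str.isIn "astro2020" (PySem.Str.lower article)) with hb | hb
  · rw [if_pos hb, hb]
    simp
  · rw [if_neg (by rw [hb]; decide), hb, kwLoop1_eq, kwLoop2_eq _ _ 0 (by omega)]
    rcases Bool.eq_false_or_eq_true (list1.any (kwHitS (PySem.Str.lower article))) with h1 | h1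
    · rw [if_pos h1, h1]
      simp
    · rw [if_neg (by rw [h1]; decide), h1]
      simp
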